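-- pv_equiv track=rewrite | github.com/ankurbhambri/DS-Algo | string/simple-string-questions.py | solution
-- ===== SOURCE A (Python) =====
-- def solution(s):
--     freq = {}
--     for i in s:
--         freq[i] = 1 + freq.get(i, 0)
--     res = ""
--     for j in s:
--         if j in freq:
--             res += j + str(freq[j])
--             del freq[j]
--     return res
-- ===== SOURCE B (Python) =====
-- def solution(s):
--     if not s:
--         return ""
--     c = s[0]
--     return c + str(s.count(c)) + solution(s.replace(c, ""))
-- ===== Notes on version B (the rewrite author's own statement) =====
-- stated objective: alternative
-- what changed: Replaces A's dict-based count-then-rescan with a dict-free recursion: emit the first character with its count from str.count, then recurse on the string with all occurrences of that character removed, handling one distinct character per step in first-appearance order.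
import Mathlib
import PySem

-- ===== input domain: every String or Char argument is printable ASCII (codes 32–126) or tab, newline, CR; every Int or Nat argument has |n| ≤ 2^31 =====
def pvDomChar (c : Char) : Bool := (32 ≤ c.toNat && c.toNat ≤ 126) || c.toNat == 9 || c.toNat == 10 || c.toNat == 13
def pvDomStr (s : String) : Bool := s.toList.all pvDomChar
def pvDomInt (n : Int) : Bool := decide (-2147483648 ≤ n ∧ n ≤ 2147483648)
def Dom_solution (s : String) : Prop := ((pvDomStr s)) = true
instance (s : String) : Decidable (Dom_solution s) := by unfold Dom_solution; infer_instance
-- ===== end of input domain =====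

-- B replaces A's dict with a dict-free recursion: emit the first char with its
-- count, recurse on the string with that char removed — an alternative
-- decomposition (O(n·k) for k distinct chars vs A's O(n)).


-- ===== PORT A =====
def solution (s : String) : String :=
  let freq := s.toList.foldl
    (fun (d : PySem.Dict Char Int) i => d.insert i (1 + d.getD i 0)) PySem.Dict.empty
  let p := s.toList.foldl
    (fun (st : List Char × PySem.Dict Char Int) j =>
      if st.2.contains j then
        (st.1 ++ j :: (PySem.Int.toStr (st.2.getD j 0)).toList, st.2.erase j)
      else st)
    ([], freq)
  String.ofList p.1

-- ===== PORT B =====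
-- B's recursion over the current (shrinking) string: first char, its count in
-- the current string, then recurse on s.replace(c, "") — replacing a single
-- character by "" is exactly removing all its occurrences (filter).
def solAltCore : List Char → List Char
  | [] => []
  | c :: t =>
      (c :: (PySem.Int.toStr ((List.count c (c :: t) : Nat) : Int)).toList)
        ++ solAltCore (t.filter (fun x => !(x == c)))
termination_by l => l.length
decreasing_by
  have h1 : (List.filter (fun x => !(x.1 == c)) t.attach).unattach.length ≤ t.length := by
    rw [List.length_unattach]
    exact le_trans (List.length_filter_le _ _) (Nat.le_of_eq List.length_attach)
  simpa using Nat.lt_succ_of_le h1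

def solution_alt (s : String) : String := String.ofList (solAltCore s.toList)

-- ===== PRECONDITION & SPEC =====
def Spec_solution (s : String) (out : String) : Prop := out = solution_alt s
instance (s : String) (out : String) : Decidable (Spec_solution s out) := by unfold Spec_solution; infer_instance

-- ===== CLAIM (what is proved, stated in full; the proofs are below) =====
def Claim_equal_solution : Prop := ∀ (s : String), Dom_solution s → Spec_solution s (solution s)

-- ===== LEMMAS AND PROOFS =====

-- the build loop with `1 + getD` is Counter(s)
theorem pv_counter_build (l : List Char) :
    l.foldl (fun (d : PySem.Dict Char Int) i => d.insert i (1 + d.getD i 0)) PySem.Dict.empty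
      = PySem.Dict.counter l := by
  have h : (fun (d : PySem.Dict Char Int) i => d.insert i (1 + d.getD i 0))
      = fun d i => d.insert i (d.getD i 0 + 1) := by
    funext d i; rw [Int.add_comm]
  rw [h, PySem.Dict.foldl_insert_getD_add_one_eq_counter]

theorem pv_contains_erase (d : PySem.Dict Char Int) (k k' : Char) :
    (d.erase k).contains k' = (!(k' == k) && d.contains k') := by
  rcases d with ⟨items⟩
  simp only [PySem.Dict.erase, PySem.Dict.contains, List.any_filter]
  induction items with
  | nil => simp
  | cons p t ih =>
    simp only [List.any_cons, ih]
    cases hb : (p.1 == k') with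
    | false =>
      simp only [Bool.and_false, Bool.false_or]
    | true =>
      have hp : p.1 = k' := beq_iff_eq.mp hb
      cases hc : (k' == k) with
      | true =>
        have h2 : k' = k := beq_iff_eq.mp hc
        have ha : (p.1 == k) = true := by rw [hp, h2]; exact BEq.rfl
        simp only [ha, Bool.not_true, Bool.false_and, Bool.false_or]
      | false =>
        have ha : (p.1 == k) = false := by rw [hp]; exact hc
        simp only [ha, Bool.not_false, Bool.true_and, Bool.and_true, Bool.true_or]

theorem pv_find?_filter_ne (t : List (Char × Int)) (k k' : Char) (h : k' ≠ k) :
    List.find? (fun p => p.1 == k') (t.filter (fun p => !p.1 == k))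
      = List.find? (fun p => p.1 == k') t := by
  induction t with
  | nil => rfl
  | cons p t ih =>
    by_cases h2 : p.1 = k
    · rw [List.filter_cons_of_neg (by simp [h2]),
        List.find?_cons_of_neg (by simp [beq_iff_eq, h2]; exact fun hh => h hh.symm), ih]
    · rw [List.filter_cons_of_pos (by simp [h2])]
      by_cases h1 : p.1 = k'
      · rw [List.find?_cons_of_pos (by simp [h1]), List.find?_cons_of_pos (by simp [h1])]
      · rw [List.find?_cons_of_neg (by simp [h1]), List.find?_cons_of_neg (by simp [h1]), ih]

theorem pv_getD_erase (d : PySem.Dict Char Int) {k k' : Char} (h : k' ≠ k) (v : Int) :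
    (d.erase k).getD k' v = d.getD k' v := by
  rcases d with ⟨items⟩
  simp only [PySem.Dict.erase, PySem.Dict.getD, PySem.Dict.get?]
  rw [pv_find?_filter_ne items k k' h]

-- A's second loop, characterised: it appends, for each still-resident key of d
-- in first-appearance order of l, the key followed by its stored value
theorem pv_loopA (l : List Char) (res : List Char) (d : PySem.Dict Char Int) :
    (l.foldl
      (fun (st : List Char × PySem.Dict Char Int) j =>
        if st.2.contains j then
          (st.1 ++ j :: (PySem.Int.toStr (st.2.getD j 0)).toList, st.2.erase j)
        else st)
      (res, d)).1
    = res ++ ((PySem.Set.ofList l).filter (fun k => d.contains k)).flatMap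
        (fun k => k :: (PySem.Int.toStr (d.getD k 0)).toList) := by
  induction l generalizing res d with
  | nil => simp [PySem.Set.ofList, PySem.Set.empty]
  | cons j t ih =>
    rw [List.foldl_cons, PySem.Set.ofList_cons]
    cases hc : d.contains j with
    | true =>
      simp only [if_pos]
      rw [ih]
      have hpred : (fun k => (d.erase j).contains k)
          = (fun k => d.contains k && !(k == j)) := by
        funext k; rw [pv_contains_erase, Bool.and_comm]
      have hfil : (PySem.Set.ofList t).filter (fun k => (d.erase j).contains k)
          = ((PySem.Set.ofList t).discard j).filter (fun k => d.contains k) := by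
        simp only [PySem.Set.discard, List.filter_filter, hpred]
      have hmap : ((PySem.Set.ofList t).filter (fun k => (d.erase j).contains k)).flatMap
            (fun k => k :: (PySem.Int.toStr ((d.erase j).getD k 0)).toList)
          = (((PySem.Set.ofList t).discard j).filter (fun k => d.contains k)).flatMap
            (fun k => k :: (PySem.Int.toStr (d.getD k 0)).toList) := by
        rw [hfil, List.flatMap_def, List.flatMap_def]
        congr 1
        apply List.map_congr_left
        intro k hk
        have hkj : k ≠ j := by
          have := (List.mem_filter.mp hk).1
          simpa [PySem.Set.discard] using (List.mem_filter.mp this).2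
        rw [pv_getD_erase d hkj]
      rw [hmap, List.filter_cons_of_pos hc]
      simp [List.append_assoc]
    | false =>
      simp only [Bool.false_eq_true, if_neg, not_false_eq_true]
      rw [ih, List.filter_cons_of_neg (by simp [hc])]
      have hpred : (fun k : Char => d.contains k && !(k == j)) = (fun k => d.contains k) := by
        funext k
        cases h : d.contains k
        · simp
        · have hkj : k ≠ j := by rintro rfl; rw [h] at hc; cases hc
          simp [hkj]
      simp only [PySem.Set.discard, List.filter_filter, hpred]

theorem pv_solAltCore_nil : solAltCore [] = [] := by
  unfold solAltCore; rfl

theorem pv_solAltCore_cons (c : Char) (t : List Char) :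
    solAltCore (c :: t)
      = (c :: (PySem.Int.toStr ((List.count c (c :: t) : Nat) : Int)).toList)
        ++ solAltCore (t.filter (fun x => !(x == c))) := by
  rw [solAltCore.eq_def]

-- set(filter) = discard from set: first-appearance order survives removing one char
theorem pv_ofList_filter_ne (t : List Char) (c : Char) :
    PySem.Set.ofList (t.filter (fun x => !(x == c)))
      = PySem.Set.discard (PySem.Set.ofList t) c := by
  induction t with
  | nil => rfl
  | cons a t ih =>
    by_cases h : a = c
    · subst h
      rw [List.filter_cons_of_neg (by simp), ih, PySem.Set.ofList_cons]
      simp [PySem.Set.discard, List.filter_filter]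
    · rw [List.filter_cons_of_pos (by simp [h]), PySem.Set.ofList_cons,
        PySem.Set.ofList_cons, ih]
      simp only [PySem.Set.discard, List.filter_cons, List.filter_filter]
      have h1 : (a == c) = false := by simp [h]
      simp [h1, Bool.and_comm]

-- B's recursion, characterised: distinct chars in first-appearance order,
-- each followed by its count
theorem pv_solAltCore (l : List Char) :
    solAltCore l
      = (PySem.Set.ofList l).flatMap
          (fun k => k :: (PySem.Int.toStr ((List.count k l : Nat) : Int)).toList) := by
  induction hn : l.length using Nat.strong_induction_on generalizing l with
  | _ n ih =>
    cases l with
    | nil => simp [pv_solAltCore_nil]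
    | cons c t =>
      rw [pv_solAltCore_cons, PySem.Set.ofList_cons, List.flatMap_cons]
      have hlt : (t.filter (fun x => !(x == c))).length < n := by
        subst hn
        simpa using Nat.lt_succ_of_le (List.length_filter_le _ _)
      rw [ih _ hlt _ rfl, pv_ofList_filter_ne]
      congr 1
      rw [List.flatMap_def, List.flatMap_def]
      congr 1
      apply List.map_congr_left
      intro k hk
      have hkc : k ≠ c := by
        simpa [PySem.Set.discard] using (List.mem_filter.mp hk).2
      have hcnt : List.count k (t.filter (fun x => !(x == c))) = List.count k (c :: t) := by
        rw [List.count_filter (by simp [hkc]), List.count_cons]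
        simpa using fun h => hkc h.symm
      rw [hcnt]

-- ===== VERDICT (by name: the statement is the Claim_ definition above) =====
theorem solution_spec : Claim_equal_solution := by
  intro s _
  unfold Spec_solution solution solution_alt
  dsimp only
  rw [pv_counter_build, pv_loopA, pv_solAltCore]
  have hfil : (PySem.Set.ofList s.toList).filter
        (fun k => (PySem.Dict.counter s.toList).contains k)
      = PySem.Set.ofList s.toList := by
    apply List.filter_eq_self.mpr
    intro k hk
    rw [PySem.Dict.contains_counter]
    exact List.elem_eq_true_of_mem ((PySem.Set.mem_ofList s.toList k).mp hk)
  rw [hfil, List.nil_append]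
  refine congrArg String.ofList ?_
  rw [List.flatMap_def, List.flatMap_def]
  refine congrArg List.flatten (List.map_congr_left ?_)
  intro k _
  rw [PySem.Dict.getD_counter]
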